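-- pv_equiv track=rewrite | github.com/prositen/advent-of-code | python/src/dec01.py | when_on_floor
-- ===== SOURCE A (Python) =====
-- def when_on_floor(start=0, instructions="", wanted_floor=0):
--     current_floor = start
--     for pos, i in enumerate(instructions):
--         if i == ')':
--             current_floor -= 1
--         elif i == '(':
--             current_floor += 1
--         if wanted_floor == current_floor:
--             return pos+1
--     return -1
-- ===== SOURCE B (Python) =====
-- def when_on_floor(start=0, instructions="", wanted_floor=0):
--     # Pass 1: build the full table of running floors (floors[j] = floor after j chars).
--     floors = [start]
--     for c in instructions:
--         floors.append(floors[-1] + ((c == '(') - (c == ')')))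
--     # Pass 2: first position j >= 1 whose floor equals the target.
--     for j in range(1, len(floors)):
--         if floors[j] == wanted_floor:
--             return j
--     return -1
-- ===== Notes on version B (the rewrite author's own statement) =====
-- stated objective: alternative
-- what changed: B first materializes the whole list of running floors (a prefix-sum table of +1/-1/0 deltas), then in a separate pass searches it for the first index >= 1 equal to wanted_floor, instead of A's fused update-and-check loop with early return.
import Mathlib
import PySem

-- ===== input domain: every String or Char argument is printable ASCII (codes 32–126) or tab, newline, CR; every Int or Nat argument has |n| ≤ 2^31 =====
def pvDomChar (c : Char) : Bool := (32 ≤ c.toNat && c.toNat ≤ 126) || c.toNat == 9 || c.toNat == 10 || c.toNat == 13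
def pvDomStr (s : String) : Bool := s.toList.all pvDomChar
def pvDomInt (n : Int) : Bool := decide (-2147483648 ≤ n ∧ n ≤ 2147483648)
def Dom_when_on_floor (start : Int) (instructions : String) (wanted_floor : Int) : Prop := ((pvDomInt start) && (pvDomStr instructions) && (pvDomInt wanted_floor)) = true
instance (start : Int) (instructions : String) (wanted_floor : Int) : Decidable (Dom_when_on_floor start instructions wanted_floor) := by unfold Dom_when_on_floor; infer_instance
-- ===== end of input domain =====

-- B builds the full prefix-floor table first and then searches it in a second pass; alternative decomposition, same O(n) cost.
-- ===== PORT A =====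
def whenGoA (wanted : Int) : List Char → Int → Int → Int
  | [], _, _ => -1
  | c :: rest, pos, cur =>
    let cur' := if c = ')' then cur - 1 else if c = '(' then cur + 1 else cur
    if wanted = cur' then pos + 1 else whenGoA wanted rest (pos + 1) cur'

def when_on_floor (start : Int) (instructions : String) (wanted_floor : Int) : Int :=
  whenGoA wanted_floor instructions.toList 0 start

-- ===== PORT B =====
def whenDelta (c : Char) : Int :=
  (if c = '(' then 1 else 0) - (if c = ')' then 1 else 0)

-- pass 2: first index j (counting from the given j) whose entry equals wanted
def whenFind (wanted : Int) : List Int → Int → Int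
  | [], _ => -1
  | x :: xs, j => if x = wanted then j else whenFind wanted xs (j + 1)

def when_on_floor_alt (start : Int) (instructions : String) (wanted_floor : Int) : Int :=
  let floors := List.scanl (fun a c => a + whenDelta c) start instructions.toList
  whenFind wanted_floor floors.tail 1

-- ===== PRECONDITION & SPEC =====
def Spec_when_on_floor (start : Int) (instructions : String) (wanted_floor : Int) (out : Int) : Prop := out = when_on_floor_alt start instructions wanted_floor
instance (start : Int) (instructions : String) (wanted_floor : Int) (out : Int) : Decidable (Spec_when_on_floor start instructions wanted_floor out) := by unfold Spec_when_on_floor; infer_instance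

-- ===== CLAIM (what is proved, stated in full; the proofs are below) =====
def Claim_equal_when_on_floor : Prop := ∀ (start : Int) (instructions : String) (wanted_floor : Int), Dom_when_on_floor start instructions wanted_floor → Spec_when_on_floor start instructions wanted_floor (when_on_floor start instructions wanted_floor)

-- ===== LEMMAS AND PROOFS =====

-- ===== VERDICT (by name: the statement is the Claim_ definition above) =====
theorem whenFind_scanl (w b j : Int) (f : Int → Char → Int) (l : List Char) :
    whenFind w (List.scanl f b l) j
      = if b = w then j else whenFind w (List.scanl f b l).tail (j + 1) := by
  cases l <;> simp [List.scanl, whenFind]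

theorem when_key (w : Int) (l : List Char) : ∀ (pos cur : Int),
    whenGoA w l pos cur
      = whenFind w (List.scanl (fun a c => a + whenDelta c) cur l).tail (pos + 1) := by
  induction l with
  | nil => intro pos cur; simp [whenGoA, whenFind]
  | cons c rest ih =>
    intro pos cur
    have hd : (if c = ')' then cur - 1 else if c = '(' then cur + 1 else cur)
        = cur + whenDelta c := by
      by_cases h1 : c = ')'
      · subst h1; simp [whenDelta]; omega
      · by_cases h2 : c = '('
        · subst h2; simp [whenDelta]
        · simp [whenDelta, h1, h2]
    have ht : (List.scanl (fun a c => a + whenDelta c) cur (c :: rest)).tail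
        = List.scanl (fun a c => a + whenDelta c) (cur + whenDelta c) rest := by
      simp [List.scanl]
    simp only [whenGoA]
    rw [hd, ht, whenFind_scanl]
    by_cases hw : w = cur + whenDelta c
    · simp [hw]
    · simp [hw, Ne.symm hw, ih (pos + 1) (cur + whenDelta c)]

theorem when_on_floor_spec : Claim_equal_when_on_floor := by
  intro start instructions wanted_floor _
  unfold Spec_when_on_floor when_on_floor when_on_floor_alt
  simpa using when_key wanted_floor instructions.toList 0 start
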